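-- pv_equiv track=rewrite | github.com/alexandraback/datacollection | solutions_5648941810974720_0/Python/Cobblob/phone.py | checkNumber
-- ===== SOURCE A (Python) =====
-- def checkNumber(s, number):
--     runs = 0
--     while 1:
--         #print s, number
--         news = s
--         for l in number:
--             if l not in news:
--                 return s, runs
--             else:
--                 news = news.replace(l, "", 1)
--         s = news
--         runs += 1
-- ===== SOURCE B (Python) =====
-- def checkNumber(s, number):
--     distinct = list(dict.fromkeys(number))
--     runs = min(s.count(c) // number.count(c) for c in distinct)
--     rest = s
--     for c in distinct:
--         rest = rest.replace(c, "", runs * number.count(c))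
--     return rest, runs
-- ===== Notes on version B (the rewrite author's own statement) =====
-- stated objective: faster
-- what changed: Replaces the repeated subtract-one-multiset-per-round while loop (each round scanning and rebuilding s per char of number) with a closed-form runs = min over distinct chars of count_s(c)//count_number(c), followed by one replace per distinct char removing runs*count occurrences at once.
import Mathlib
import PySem

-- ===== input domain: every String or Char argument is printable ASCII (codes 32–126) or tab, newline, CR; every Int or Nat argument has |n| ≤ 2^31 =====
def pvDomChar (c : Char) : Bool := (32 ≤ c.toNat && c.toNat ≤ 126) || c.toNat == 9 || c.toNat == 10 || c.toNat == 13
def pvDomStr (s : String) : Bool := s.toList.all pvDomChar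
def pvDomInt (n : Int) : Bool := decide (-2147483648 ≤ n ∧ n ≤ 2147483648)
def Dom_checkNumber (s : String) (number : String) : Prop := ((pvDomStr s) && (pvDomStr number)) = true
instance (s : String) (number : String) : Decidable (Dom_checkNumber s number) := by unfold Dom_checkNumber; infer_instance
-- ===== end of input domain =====

-- B computes the number of whole char-multiset subtractions in closed form (min of count quotients)
-- and removes all occurrences in one replace per distinct char, instead of A's round-by-round loop; faster.

-- ===== PORT A =====
-- inner 'for l in number' loop: none = the early 'return s, runs'
def pvInnerA (news : List Char) : List Char → Option (List Char)
  | [] => some news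
  | l :: rest => if l ∈ news then pvInnerA (news.erase l) rest else none

-- 'while 1' loop with fuel (totality guard only: within Pre_ the fuel s.length+1 is never exhausted)
def pvLoopA : Nat → List Char → List Char → Int → List Char × Int
  | 0, s, _, runs => (s, runs)
  | fuel + 1, s, num, runs =>
    match pvInnerA s num with
    | none => (s, runs)
    | some news => pvLoopA fuel news num (runs + 1)

def checkNumber (s : String) (number : String) : String × Int :=
  let r := pvLoopA (s.toList.length + 1) s.toList number.toList 0
  (String.mk r.1, r.2)

-- ===== PORT B =====
-- hand port of Python's rest.replace(c, "", k) for a single char: remove the first k occurrences (exact)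
def pvRemoveK : List Char → Char → Nat → List Char
  | [], _, _ => []
  | x :: xs, c, k =>
    if x = c then
      match k with
      | 0 => x :: pvRemoveK xs c 0
      | k' + 1 => pvRemoveK xs c k'
    else x :: pvRemoveK xs c k

def checkNumber_alt (s : String) (number : String) : String × Int :=
  let ss := s.toList
  let num := number.toList
  match PySem.List.dedup num with   -- list(dict.fromkeys(number))
  | [] => ("", 0)                   -- Python B raises ValueError (min of empty) here; outside Pre_
  | c0 :: rest =>
    let runs := rest.foldl (fun m c => min m (ss.count c / num.count c)) (ss.count c0 / num.count c0)
    let out := (c0 :: rest).foldl (fun acc c => pvRemoveK acc c (runs * num.count c)) ss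
    (String.mk out, (runs : Int))

-- ===== PRECONDITION & SPEC =====
-- Pre_ excludes only number = "": there A's while loop never terminates (and B's min() raises ValueError).
def Pre_checkNumber (s : String) (number : String) : Prop := number ≠ ""
instance (s : String) (number : String) : Decidable (Pre_checkNumber s number) := by unfold Pre_checkNumber; infer_instance
def pvWitness_checkNumber : String × String := ("aabbab", "ab")

def Spec_checkNumber (s : String) (number : String) (out : String × Int) : Prop := out = checkNumber_alt s number
instance (s : String) (number : String) (out : String × Int) : Decidable (Spec_checkNumber s number out) := by unfold Spec_checkNumber; infer_instance

-- ===== CLAIM (what is proved, stated in full; the proofs are below) =====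
def Claim_equal_checkNumber : Prop := ∀ (s : String) (number : String), Dom_checkNumber s number → Pre_checkNumber s number → Spec_checkNumber s number (checkNumber s number)

-- ===== LEMMAS AND PROOFS =====

-- semantic remover: one pass removing the first (f c) occurrences of every char c
def pvRem : (Char → Nat) → List Char → List Char
  | _, [] => []
  | f, x :: xs => if f x = 0 then x :: pvRem f xs else pvRem (fun d => if d = x then f d - 1 else f d) xs

theorem pvRem_zero : ∀ (l : List Char), pvRem (fun _ => 0) l = l := by
  intro l; induction l with
  | nil => rfl
  | cons x xs ih => simp [pvRem, ih]

theorem pvRem_congr (f g : Char → Nat) (h : ∀ c, f c = g c) : ∀ l, pvRem f l = pvRem g l := by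
  have : f = g := funext h
  intro l; rw [this]

theorem count_pvRem : ∀ (l : List Char) (f : Char → Nat) (c : Char),
    (pvRem f l).count c = l.count c - min (f c) (l.count c) := by
  intro l
  induction l with
  | nil => intro f c; simp [pvRem]
  | cons x xs ih =>
    intro f c
    by_cases hc : c = x
    · subst hc
      by_cases hx : f c = 0
      · simp [pvRem, hx, List.count_cons, ih]
      · simp only [pvRem, if_neg hx, ih, List.count_cons]
        simp
        omega
    · have hcx : ¬ x = c := fun h => hc h.symm
      by_cases hx : f x = 0
      · simp [pvRem, hx, List.count_cons, hc, hcx, ih]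
      · simp [pvRem, hx, List.count_cons, hc, hcx, ih]

theorem pvRem_pvRem : ∀ (l : List Char) (f g : Char → Nat),
    pvRem f (pvRem g l) = pvRem (fun c => g c + f c) l := by
  intro l
  induction l with
  | nil => intro f g; simp [pvRem]
  | cons x xs ih =>
    intro f g
    by_cases hg : g x = 0
    · simp only [pvRem, hg, if_true]
      by_cases hf : f x = 0
      · simp only [pvRem, hf, hg, Nat.add_zero, if_true]
        rw [ih]
      · simp only [pvRem, hf, hg, Nat.zero_add, if_false]
        rw [ih]
        apply pvRem_congr
        intro c
        by_cases hc : c = x <;> simp [hc, hg] <;> omega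
    · simp only [pvRem, hg, if_false]
      have hfg : ¬ (g x + f x = 0) := by omega
      simp only [pvRem, hfg, if_false]
      rw [ih]
      apply pvRem_congr
      intro c
      by_cases hc : c = x <;> simp [hc] <;> omega

theorem erase_eq_pvRem : ∀ (l : List Char) (c : Char),
    l.erase c = pvRem (fun d => if d = c then 1 else 0) l := by
  intro l c
  induction l with
  | nil => rfl
  | cons x xs ih =>
    by_cases hx : x = c
    · subst hx
      rw [List.erase_cons_head]
      simp only [pvRem, if_pos rfl]
      norm_num
      have : (fun d => (if d = x then (if d = x then 1 else 0) - 1 else if d = x then 1 else 0 : Nat)) = (fun _ => (0:Nat)) := by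
        funext d; by_cases hd : d = x <;> simp [hd]
      rw [this, pvRem_zero]
    · rw [List.erase_cons_tail (by simp [hx])]
      simp only [pvRem, if_neg hx]
      simp [hx, ih]

theorem pvRemoveK_eq : ∀ (l : List Char) (c : Char) (k : Nat),
    pvRemoveK l c k = pvRem (fun d => if d = c then k else 0) l := by
  intro l
  induction l with
  | nil => intro c k; rfl
  | cons x xs ih =>
    intro c k
    by_cases hx : x = c
    · subst hx
      cases k with
      | zero => simp [pvRemoveK, pvRem, ih]
      | succ k' =>
        simp only [pvRemoveK, if_pos rfl, pvRem, if_pos rfl]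
        norm_num
        rw [ih]
        apply pvRem_congr
        intro d
        by_cases hd : d = x <;> simp [hd]
    · simp [pvRemoveK, pvRem, hx, ih]

-- inner loop characterization
theorem innerA_some : ∀ (num news : List Char),
    (∀ c, num.count c ≤ news.count c) →
    pvInnerA news num = some (pvRem (fun c => num.count c) news) := by
  intro num
  induction num with
  | nil =>
    intro news _
    simp only [pvInnerA]
    rw [pvRem_congr _ (fun _ => 0) (by intro c; simp), pvRem_zero]
  | cons l rest ih =>
    intro news h
    have hl : l ∈ news := by
      have := h l
      simp [List.count_cons] at this
      exact List.count_pos_iff.mp (by omega)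
    simp only [pvInnerA, if_pos hl]
    rw [ih (news.erase l) ?_]
    · congr 1
      rw [erase_eq_pvRem, pvRem_pvRem]
      apply pvRem_congr
      intro c
      rw [List.count_cons]
      by_cases hc : c = l
      · subst hc; simp; omega
      · have hlc : ¬ l = c := fun h => hc h.symm
        simp [hc, hlc]
    · intro c
      have hcnt := h c
      rw [List.count_erase]
      rw [List.count_cons] at hcnt
      by_cases hc : c = l
      · subst hc
        simp at hcnt ⊢
        omega
      · simp [hc] at hcnt ⊢
        omega

theorem innerA_none : ∀ (num news : List Char) (c : Char),
    c ∈ num → news.count c < num.count c →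
    pvInnerA news num = none := by
  intro num
  induction num with
  | nil => intro news c hc; simp at hc
  | cons l rest ih =>
    intro news c hc hlt
    by_cases hl : l ∈ news
    · simp only [pvInnerA, if_pos hl]
      rw [List.count_cons] at hlt
      by_cases hcl : c = l
      · subst hcl
        simp at hlt
        have h1 : 1 ≤ news.count c := List.count_pos_iff.mpr hl
        by_cases hcr : c ∈ rest
        · apply ih _ c hcr
          rw [List.count_erase]
          simp
          omega
        · exfalso
          have h0 : rest.count c = 0 := List.count_eq_zero_of_not_mem hcr
          omega
      · have hcr : c ∈ rest := by
          rcases List.mem_cons.mp hc with h | h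
          · exact absurd h hcl
          · exact h
        apply ih _ c hcr
        rw [List.count_erase]
        have hlc : ¬ l = c := fun h => hcl h.symm
        simp [hcl, hlc] at hlt ⊢
        omega
    · simp [pvInnerA, hl]

-- the while loop runs exactly R rounds
theorem loopA (num : List Char) : ∀ (R : Nat) (fuel : Nat) (ss : List Char) (runs : Int),
    (∀ c ∈ num, R * num.count c ≤ ss.count c) →
    (∃ c ∈ num, ss.count c < (R + 1) * num.count c) →
    R + 1 ≤ fuel →
    pvLoopA fuel ss num runs = (pvRem (fun c => R * num.count c) ss, runs + R) := by
  intro R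
  induction R with
  | zero =>
    intro fuel ss runs _ hex hfuel
    obtain ⟨f, rfl⟩ : ∃ f, fuel = f + 1 := ⟨fuel - 1, by omega⟩
    obtain ⟨c, hc, hlt⟩ := hex
    rw [Nat.one_mul] at hlt
    simp only [pvLoopA, innerA_none num ss c hc hlt]
    have h0 : pvRem (fun c => 0 * num.count c) ss = ss := by
      rw [pvRem_congr _ (fun _ => 0) (by intro c'; simp), pvRem_zero]
    rw [h0]
    simp
  | succ R' ih =>
    intro fuel ss runs hall hex hfuel
    obtain ⟨f, rfl⟩ : ∃ f, fuel = f + 1 := ⟨fuel - 1, by omega⟩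
    have hC : ∀ c, num.count c ≤ ss.count c := by
      intro c
      by_cases hc : c ∈ num
      · calc num.count c = 1 * num.count c := by ring
          _ ≤ (R' + 1) * num.count c := Nat.mul_le_mul_right _ (by omega)
          _ ≤ ss.count c := hall c hc
      · simp [List.count_eq_zero_of_not_mem hc]
    simp only [pvLoopA, innerA_some num ss hC]
    have hcount : ∀ c, (pvRem (fun c => num.count c) ss).count c = ss.count c - num.count c := by
      intro c
      rw [count_pvRem]
      have := hC c
      omega
    rw [ih f _ (runs + 1) ?_ ?_ (by omega)]
    · have h1 : pvRem (fun c => R' * num.count c) (pvRem (fun c => num.count c) ss)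
          = pvRem (fun c => (R' + 1) * num.count c) ss := by
        rw [pvRem_pvRem]
        apply pvRem_congr
        intro c
        ring
      rw [h1]
      congr 1
      push_cast
      ring
    · intro c hc
      rw [hcount]
      have h1 := hall c hc
      rw [Nat.succ_mul] at h1
      omega
    · obtain ⟨c, hc, hlt⟩ := hex
      refine ⟨c, hc, ?_⟩
      rw [hcount]
      have h1 := hC c
      rw [Nat.succ_mul, Nat.succ_mul] at hlt
      rw [Nat.succ_mul]
      omega

-- foldl-min facts
theorem foldl_min_le_init (f : Char → Nat) : ∀ (l : List Char) (a : Nat),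
    l.foldl (fun m c => min m (f c)) a ≤ a := by
  intro l
  induction l with
  | nil => intro a; simp
  | cons x xs ih =>
    intro a
    simp only [List.foldl_cons]
    exact le_trans (ih _) (by omega)

theorem foldl_min_le (f : Char → Nat) : ∀ (l : List Char) (a : Nat) (c : Char), c ∈ l →
    l.foldl (fun m c => min m (f c)) a ≤ f c := by
  intro l
  induction l with
  | nil => intro a c hc; simp at hc
  | cons x xs ih =>
    intro a c hc
    simp only [List.foldl_cons]
    rcases List.mem_cons.mp hc with h | h
    · subst h
      exact le_trans (foldl_min_le_init f xs _) (by omega)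
    · exact ih _ c h

theorem foldl_min_attain (f : Char → Nat) : ∀ (l : List Char) (a : Nat),
    l.foldl (fun m c => min m (f c)) a = a ∨ ∃ c ∈ l, l.foldl (fun m c => min m (f c)) a = f c := by
  intro l
  induction l with
  | nil => intro a; left; rfl
  | cons x xs ih =>
    intro a
    simp only [List.foldl_cons]
    rcases ih (min a (f x)) with h | ⟨c, hc, h⟩
    · by_cases hax : a ≤ f x
      · left; rw [h]; omega
      · right; exact ⟨x, List.mem_cons_self, by rw [h]; omega⟩
    · right; exact ⟨c, List.mem_cons_of_mem _ hc, h⟩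

-- the B-side fold of replaces is one simultaneous pvRem
theorem foldl_removeK (g : Char → Nat) : ∀ (d : List Char), d.Nodup → ∀ (l : List Char),
    d.foldl (fun acc c => pvRemoveK acc c (g c)) l = pvRem (fun x => if x ∈ d then g x else 0) l := by
  intro d
  induction d with
  | nil =>
    intro _ l
    simp only [List.foldl_nil]
    rw [pvRem_congr _ (fun _ => 0) (by intro c; simp), pvRem_zero]
  | cons c rest ih =>
    intro hnd l
    have hcrest : c ∉ rest := (List.nodup_cons.mp hnd).1
    simp only [List.foldl_cons]
    rw [ih (List.nodup_cons.mp hnd).2, pvRemoveK_eq, pvRem_pvRem]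
    apply pvRem_congr
    intro x
    by_cases hx : x = c
    · subst hx
      simp [hcrest]
    · simp [hx]

theorem toList_ne_nil_of_ne_empty (s : String) (h : s ≠ "") : s.toList ≠ [] := by
  intro hnil
  exact h (String.toList_eq_nil_iff.mp hnil)

theorem dedup_eq_nil (l : List Char) (h : PySem.List.dedup l = []) : l = [] := by
  cases l with
  | nil => rfl
  | cons x xs =>
    exfalso
    have : x ∈ PySem.List.dedup (x :: xs) := (PySem.List.mem_dedup _ x).mpr List.mem_cons_self
    rw [h] at this
    simp at this

-- ===== VERDICT (by name: the statement is the Claim_ definition above) =====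
theorem checkNumber_spec : Claim_equal_checkNumber := by
  intro s number _ hpre
  unfold Spec_checkNumber checkNumber checkNumber_alt
  have hnum : number.toList ≠ [] := toList_ne_nil_of_ne_empty number hpre
  cases hd : PySem.List.dedup number.toList with
  | nil => exact absurd (dedup_eq_nil _ hd) hnum
  | cons c0 rest =>
    simp only [hd]
    set R := rest.foldl (fun m c => min m (s.toList.count c / (number.toList).count c))
      (s.toList.count c0 / (number.toList).count c0) with hR
    have hmemd : ∀ c, c ∈ c0 :: rest ↔ c ∈ number.toList := by
      intro c; rw [← hd]; exact PySem.List.mem_dedup _ c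
    have hnodup : (c0 :: rest).Nodup := hd ▸ PySem.List.nodup_dedup _
    have hpos : ∀ c ∈ number.toList, 0 < (number.toList).count c := by
      intro c hc; exact List.count_pos_iff.mpr hc
    have hRmin : ∀ c ∈ c0 :: rest, R ≤ s.toList.count c / (number.toList).count c := by
      intro c hc
      rcases List.mem_cons.mp hc with h | h
      · subst h; exact foldl_min_le_init _ _ _
      · exact foldl_min_le _ _ _ _ h
    have hRle : ∀ c ∈ number.toList, R * (number.toList).count c ≤ s.toList.count c := by
      intro c hc
      exact (Nat.le_div_iff_mul_le (hpos c hc)).mp (hRmin c ((hmemd c).mpr hc))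
    have hRex : ∃ c ∈ number.toList,
        s.toList.count c < (R + 1) * (number.toList).count c := by
      have hat := foldl_min_attain
        (fun c => s.toList.count c / (number.toList).count c) rest
        (s.toList.count c0 / (number.toList).count c0)
      have hex : ∃ c ∈ c0 :: rest, R = s.toList.count c / (number.toList).count c := by
        rcases hat with h | ⟨c, hc, h⟩
        · exact ⟨c0, List.mem_cons_self, h⟩
        · exact ⟨c, List.mem_cons_of_mem _ hc, h⟩
      obtain ⟨c, hc, hRc⟩ := hex
      have hcn : c ∈ number.toList := (hmemd c).mp hc
      refine ⟨c, hcn, ?_⟩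
      rw [hRc]
      have hk := hpos c hcn
      have hdm := Nat.div_add_mod (s.toList.count c) ((number.toList).count c)
      have hml := Nat.mod_lt (s.toList.count c) hk
      have hcm : (number.toList).count c * (s.toList.count c / (number.toList).count c)
          = (s.toList.count c / (number.toList).count c) * (number.toList).count c :=
        Nat.mul_comm _ _
      rw [Nat.succ_mul]
      omega
    have hfuel : R + 1 ≤ s.toList.length + 1 := by
      have hc0 : c0 ∈ number.toList := (hmemd c0).mp List.mem_cons_self
      have h1 := hRle c0 hc0
      have h3 := hpos c0 hc0
      have h2 : s.toList.count c0 ≤ s.toList.length := List.count_le_length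
      have h4 : R * 1 ≤ R * (number.toList).count c0 := Nat.mul_le_mul_left _ h3
      rw [Nat.mul_one] at h4
      omega
    rw [loopA number.toList R _ _ 0 hRle hRex hfuel]
    rw [foldl_removeK (fun c => R * (number.toList).count c) (c0 :: rest) hnodup s.toList]
    rw [pvRem_congr
      (fun c => R * (number.toList).count c)
      (fun x => if x ∈ c0 :: rest then R * (number.toList).count x else 0)
      ?_ s.toList]
    · simp
    · intro c
      by_cases hc : c ∈ c0 :: rest
      · simp [hc]
      · have hcn : c ∉ number.toList := fun h => hc ((hmemd c).mpr h)
        simp [hc, List.count_eq_zero_of_not_mem hcn]
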